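-- pv_equiv track=rewrite | github.com/erpplaneacion-eng/ERP_CHVS | erp_chvs/dashboard/services.py | _resolver_sede
-- ===== SOURCE A (Python) =====
-- def _resolver_sede(nombre_buscado, mapa):
--     if not nombre_buscado or not mapa:
--         return None
--     if nombre_buscado in mapa:
--         return mapa[nombre_buscado]
--     nombre_lower = nombre_buscado.lower().strip()
--     for nombre, cod in mapa.items():
--         if nombre.lower().strip() == nombre_lower:
--             return cod
--     for nombre, cod in mapa.items():
--         if nombre_lower in nombre.lower() or nombre.lower() in nombre_lower:
--             return cod
--     return None
-- ===== SOURCE B (Python) =====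
-- def _resolver_sede(nombre_buscado, mapa):
--     if not nombre_buscado or not mapa:
--         return None
--     nombre_lower = nombre_buscado.lower().strip()
--     best = None  # (score, codigo): score 0 = raw key match, 1 = lower/strip match, 2 = substring match
--     for nombre, cod in mapa.items():
--         if nombre == nombre_buscado:
--             score = 0
--         elif nombre.lower().strip() == nombre_lower:
--             score = 1
--         elif nombre_lower in nombre.lower() or nombre.lower() in nombre_lower:
--             score = 2
--         else:
--             continue
--         if best is None or score < best[0]:
--             best = (score, cod)
--     return None if best is None else best[1]
-- ===== Notes on version B (the rewrite author's own statement) =====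
-- stated objective: alternative
-- what changed: Replaces A's dict lookup plus two sequential fallback scans with a single scored pass: each entry gets a match priority (0 raw, 1 lower-stripped, 2 substring) and one fold keeps the earliest entry of minimal priority (not faster: it forgoes A's early returns).
import Mathlib
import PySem

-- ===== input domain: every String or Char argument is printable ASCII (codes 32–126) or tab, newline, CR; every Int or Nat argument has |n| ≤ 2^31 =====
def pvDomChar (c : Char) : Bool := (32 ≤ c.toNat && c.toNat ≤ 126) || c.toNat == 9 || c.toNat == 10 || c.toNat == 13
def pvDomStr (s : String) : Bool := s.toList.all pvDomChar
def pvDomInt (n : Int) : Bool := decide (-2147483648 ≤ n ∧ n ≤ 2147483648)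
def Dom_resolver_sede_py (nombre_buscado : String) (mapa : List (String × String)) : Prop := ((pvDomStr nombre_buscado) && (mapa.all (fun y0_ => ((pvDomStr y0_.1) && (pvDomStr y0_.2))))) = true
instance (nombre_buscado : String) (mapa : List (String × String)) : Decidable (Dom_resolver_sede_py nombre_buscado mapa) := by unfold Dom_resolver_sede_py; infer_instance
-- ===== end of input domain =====

-- B replaces A's dict lookup + two sequential fallback scans by one scored pass keeping
-- the earliest entry of minimal match priority (alternative decomposition; not faster).

-- ===== PORT A =====
-- first pass: cod of the first entry whose lower().strip() name equals nombre_lower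
def pvPassExact (nl : String) : List (String × String) → Option String
  | [] => none
  | (n, c) :: t =>
    if PySem.Str.strip (PySem.Str.lower n) == nl then some c else pvPassExact nl t

-- second pass: cod of the first entry with a bidirectional substring match
def pvPassSub (nl : String) : List (String × String) → Option String
  | [] => none
  | (n, c) :: t =>
    if PySem.Str.isIn nl (PySem.Str.lower n) || PySem.Str.isIn (PySem.Str.lower n) nl then
      some c
    else pvPassSub nl t

def resolver_sede_py (nombre_buscado : String) (mapa : List (String × String)) : Option String :=
  if nombre_buscado == "" || mapa == [] then none
  else
    match mapa.find? (fun p => p.1 == nombre_buscado) with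
    | some p => some p.2
    | none =>
      let nombre_lower := PySem.Str.strip (PySem.Str.lower nombre_buscado)
      match pvPassExact nombre_lower mapa with
      | some c => some c
      | none => pvPassSub nombre_lower mapa

-- ===== PORT B =====
-- match priority of one name: 0 raw, 1 lower/strip, 2 substring, none otherwise
def pvScore (nb nl n : String) : Option Nat :=
  if n == nb then some 0
  else if PySem.Str.strip (PySem.Str.lower n) == nl then some 1
  else if PySem.Str.isIn nl (PySem.Str.lower n) || PySem.Str.isIn (PySem.Str.lower n) nl then some 2
  else none

-- the single loop: keep the best (score, cod) so far, replacing only on a strictly better score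
def pvBestLoop (nb nl : String) (best : Option (Nat × String)) : List (String × String) → Option (Nat × String)
  | [] => best
  | (n, c) :: t =>
    pvBestLoop nb nl
      (match pvScore nb nl n with
       | none => best
       | some s =>
         match best with
         | none => some (s, c)
         | some (bs, bc) => if s < bs then some (s, c) else some (bs, bc)) t

def resolver_sede_py_alt (nombre_buscado : String) (mapa : List (String × String)) : Option String :=
  if nombre_buscado == "" || mapa == [] then none
  else
    (pvBestLoop nombre_buscado (PySem.Str.strip (PySem.Str.lower nombre_buscado)) none mapa).map
      Prod.snd

-- ===== PRECONDITION & SPEC =====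
def Spec_resolver_sede_py (nombre_buscado : String) (mapa : List (String × String)) (out : Option String) : Prop := out = resolver_sede_py_alt nombre_buscado mapa
instance (nombre_buscado : String) (mapa : List (String × String)) (out : Option String) : Decidable (Spec_resolver_sede_py nombre_buscado mapa out) := by unfold Spec_resolver_sede_py; infer_instance

-- ===== CLAIM (what is proved, stated in full; the proofs are below) =====
def Claim_equal_resolver_sede_py : Prop := ∀ (nombre_buscado : String) (mapa : List (String × String)), Dom_resolver_sede_py nombre_buscado mapa → Spec_resolver_sede_py nombre_buscado mapa (resolver_sede_py nombre_buscado mapa)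

-- ===== LEMMAS AND PROOFS =====

-- left-biased minimum-by-score of two candidates (proof-only helper)
def pvMerge : Option (Nat × String) → Option (Nat × String) → Option (Nat × String)
  | none, i => i
  | some b, none => some b
  | some (bs, bc), some (is_, ic) => if is_ < bs then some (is_, ic) else some (bs, bc)

-- A's staged result, tagged with its priority
def pvIdeal (nb nl : String) (mapa : List (String × String)) : Option (Nat × String) :=
  match mapa.find? (fun p => p.1 == nb) with
  | some p => some (0, p.2)
  | none =>
    match pvPassExact nl mapa with
    | some c => some (1, c)
    | none => (pvPassSub nl mapa).map (fun c => (2, c))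

theorem pvMerge_zero (c : String) (i : Option (Nat × String)) :
    pvMerge (some (0, c)) i = some (0, c) := by
  cases i with
  | none => rfl
  | some x => obtain ⟨xs, xc⟩ := x; simp [pvMerge]

theorem pvIdeal_score_pos (nb nl : String) (mapa : List (String × String))
    (hf : mapa.find? (fun p => p.1 == nb) = none) (x : Nat × String)
    (h : pvIdeal nb nl mapa = some x) : 1 ≤ x.1 := by
  unfold pvIdeal at h
  rw [hf] at h
  cases he : pvPassExact nl mapa with
  | some c =>
    rw [he, Option.some_inj] at h
    rw [← h]
  | none =>
    rw [he] at h
    cases hs : pvPassSub nl mapa with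
    | some c =>
      rw [hs, Option.map_some, Option.some_inj] at h
      rw [← h]
      exact one_le_two
    | none => rw [hs] at h; simp at h

theorem pvIdeal_cons (nb nl n c : String) (t : List (String × String)) :
    pvIdeal nb nl ((n, c) :: t) =
      pvMerge ((pvScore nb nl n).map (fun s => (s, c))) (pvIdeal nb nl t) := by
  by_cases h0 : (n == nb) = true
  · -- raw key hit: priority 0 beats anything the tail offers
    have hsc : pvScore nb nl n = some 0 := by unfold pvScore; rw [if_pos h0]
    have hfind : ((n, c) :: t).find? (fun p => p.1 == nb) = some (n, c) := by
      simp [List.find?, h0]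
    have hL : pvIdeal nb nl ((n, c) :: t) = some (0, c) := by unfold pvIdeal; rw [hfind]
    rw [hL, hsc, Option.map_some, pvMerge_zero]
  · have hfc : ((n, c) :: t).find? (fun p => p.1 == nb) = t.find? (fun p => p.1 == nb) := by
      simp [List.find?, h0]
    by_cases h1 : (PySem.Str.strip (PySem.Str.lower n) == nl) = true
    · -- lower/strip hit on the head: priority 1
      have hsc : pvScore nb nl n = some 1 := by unfold pvScore; rw [if_neg h0, if_pos h1]
      have hpe : pvPassExact nl ((n, c) :: t) = some c := by
        simp only [pvPassExact]; rw [if_pos h1]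
      rw [hsc, Option.map_some]
      cases hft : t.find? (fun p => p.1 == nb) with
      | some p =>
        have hL : pvIdeal nb nl ((n, c) :: t) = some (0, p.2) := by
          unfold pvIdeal; rw [hfc, hft]
        have hR : pvIdeal nb nl t = some (0, p.2) := by unfold pvIdeal; rw [hft]
        rw [hL, hR]
        simp [pvMerge]
      | none =>
        have hL : pvIdeal nb nl ((n, c) :: t) = some (1, c) := by
          unfold pvIdeal; rw [hfc, hft, hpe]
        rw [hL]
        cases hi : pvIdeal nb nl t with
        | none => rfl
        | some x =>
          obtain ⟨xs, xc⟩ := x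
          have hx : 1 ≤ xs := pvIdeal_score_pos nb nl t hft (xs, xc) hi
          simp [pvMerge, Nat.not_lt.mpr hx]
    · have hpe : pvPassExact nl ((n, c) :: t) = pvPassExact nl t := by
        simp only [pvPassExact]; rw [if_neg h1]
      by_cases h2 : (PySem.Str.isIn nl (PySem.Str.lower n) || PySem.Str.isIn (PySem.Str.lower n) nl) = true
      · -- substring hit on the head: priority 2
        have hsc : pvScore nb nl n = some 2 := by
          unfold pvScore; rw [if_neg h0, if_neg h1, if_pos h2]
        have hps : pvPassSub nl ((n, c) :: t) = some c := by
          simp only [pvPassSub]; rw [if_pos h2]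
        rw [hsc, Option.map_some]
        cases hft : t.find? (fun p => p.1 == nb) with
        | some p =>
          have hL : pvIdeal nb nl ((n, c) :: t) = some (0, p.2) := by
            unfold pvIdeal; rw [hfc, hft]
          have hR : pvIdeal nb nl t = some (0, p.2) := by unfold pvIdeal; rw [hft]
          rw [hL, hR]
          simp [pvMerge]
        | none =>
          cases he : pvPassExact nl t with
          | some c' =>
            have hL : pvIdeal nb nl ((n, c) :: t) = some (1, c') := by
              unfold pvIdeal; rw [hfc, hft, hpe, he]
            have hR : pvIdeal nb nl t = some (1, c') := by unfold pvIdeal; rw [hft, he]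
            rw [hL, hR]
            simp [pvMerge]
          | none =>
            have hR : pvIdeal nb nl t = (pvPassSub nl t).map (fun c => (2, c)) := by
              unfold pvIdeal; rw [hft, he]
            cases hs : pvPassSub nl t with
            | some c' =>
              have hL : pvIdeal nb nl ((n, c) :: t) = some (2, c) := by
                unfold pvIdeal; rw [hfc, hft, hpe, he, hps]; rfl
              rw [hL, hR, hs, Option.map_some]
              simp [pvMerge]
            | none =>
              have hL : pvIdeal nb nl ((n, c) :: t) = some (2, c) := by
                unfold pvIdeal; rw [hfc, hft, hpe, he, hps]; rfl
              rw [hL, hR, hs, Option.map_none]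
              rfl
      · -- no match on the head: the head contributes nothing
        have hsc : pvScore nb nl n = none := by
          unfold pvScore; rw [if_neg h0, if_neg h1, if_neg h2]
        have hps : pvPassSub nl ((n, c) :: t) = pvPassSub nl t := by
          simp only [pvPassSub]; rw [if_neg h2]
        have hL : pvIdeal nb nl ((n, c) :: t) = pvIdeal nb nl t := by
          unfold pvIdeal; rw [hfc, hpe, hps]
        rw [hL, hsc, Option.map_none]
        rfl

theorem pvMerge_assoc (a b c : Option (Nat × String)) :
    pvMerge (pvMerge a b) c = pvMerge a (pvMerge b c) := by
  cases a with
  | none => rfl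
  | some x =>
    cases b with
    | none => rfl
    | some y =>
      obtain ⟨xs, xc⟩ := x; obtain ⟨ys, yc⟩ := y
      cases c with
      | none => simp only [pvMerge]; split_ifs <;> rfl
      | some z =>
        obtain ⟨zs, zc⟩ := z
        simp only [pvMerge]
        split_ifs <;> simp only [pvMerge] <;> split_ifs <;> first | rfl | omega

theorem pvBestLoop_eq (nb nl : String) (mapa : List (String × String)) (best : Option (Nat × String)) :
    pvBestLoop nb nl best mapa = pvMerge best (pvIdeal nb nl mapa) := by
  induction mapa generalizing best with
  | nil =>
    cases best <;> simp [pvBestLoop, pvIdeal, pvMerge, List.find?, pvPassExact, pvPassSub]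
  | cons p t ih =>
    obtain ⟨n, c⟩ := p
    have hstep :
        (match pvScore nb nl n with
         | none => best
         | some s =>
           match best with
           | none => some (s, c)
           | some (bs, bc) => if s < bs then some (s, c) else some (bs, bc)) =
        pvMerge best ((pvScore nb nl n).map (fun s => (s, c))) := by
      cases pvScore nb nl n with
      | none => cases best <;> rfl
      | some s =>
        cases best with
        | none => rfl
        | some b => obtain ⟨bs, bc⟩ := b; rfl
    simp only [pvBestLoop, hstep, ih, pvIdeal_cons, pvMerge_assoc]

-- ===== VERDICT (by name: the statement is the Claim_ definition above) =====
theorem resolver_sede_py_spec : Claim_equal_resolver_sede_py := by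
  intro nb mapa _
  unfold Spec_resolver_sede_py resolver_sede_py resolver_sede_py_alt
  by_cases h0 : (nb == "" || mapa == []) = true
  · rw [if_pos h0, if_pos h0]
  · rw [if_neg h0, if_neg h0]
    rw [pvBestLoop_eq]
    show _ = (pvIdeal nb (PySem.Str.strip (PySem.Str.lower nb)) mapa).map Prod.snd
    unfold pvIdeal
    cases hf : mapa.find? (fun p => p.1 == nb) with
    | some p => simp
    | none =>
      cases he : pvPassExact (PySem.Str.strip (PySem.Str.lower nb)) mapa with
      | some c => simp [he]
      | none =>
        cases hs : pvPassSub (PySem.Str.strip (PySem.Str.lower nb)) mapa with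
        | some c => simp [he, hs]
        | none => simp [he, hs]
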